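-- pv_equiv track=rewrite | github.com/coda-seito/congress | src/html-to-txt.py | combine_hyphenated_words
-- ===== SOURCE A (Python) =====
-- def combine_hyphenated_words(line):
--     words = line.split()
--     combined_words = []
--     i = 0
--     while i < len(words):
--         if '-' in words[i]:
--             combined_word = words[i]
--             i += 1
--             while i < len(words) and '-' in words[i]:
--                 combined_word += words[i]
--                 i += 1
--             combined_words.append(combined_word)
--         else:
--             combined_words.append(words[i])
--             i += 1
--     return ' '.join(combined_words)
-- ===== SOURCE B (Python) =====
-- def combine_hyphenated_words(line):
--     out = []
--     for w in line.split():
--         if out and '-' in w and '-' in out[-1]: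
--             out[-1] = out[-1] + w
--         else:
--             out.append(w)
--     return ' '.join(out)
-- ===== Notes on version B (the rewrite author's own statement) =====
-- stated objective: simpler
-- what changed: Replaced the i-cursor while loop with a nested run-consuming while by a single for loop that folds each word into the output list, merging a hyphenated word into the previous output entry when that entry is hyphenated.
import Mathlib
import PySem

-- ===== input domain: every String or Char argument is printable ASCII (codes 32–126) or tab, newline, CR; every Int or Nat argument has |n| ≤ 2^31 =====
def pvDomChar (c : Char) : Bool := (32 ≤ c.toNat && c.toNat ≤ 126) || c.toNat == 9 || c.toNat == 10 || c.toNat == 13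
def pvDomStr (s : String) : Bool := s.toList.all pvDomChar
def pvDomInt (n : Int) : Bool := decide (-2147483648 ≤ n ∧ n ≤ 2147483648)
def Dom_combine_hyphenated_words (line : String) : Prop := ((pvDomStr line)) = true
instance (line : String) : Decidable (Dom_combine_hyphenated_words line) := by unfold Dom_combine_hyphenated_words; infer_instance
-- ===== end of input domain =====

-- B replaces A's i-cursor while loop (with a nested run-consuming inner while) by a single
-- left fold that merges a hyphenated word into the previous output entry; objective: simpler.

-- ===== PORT A =====
-- inner while: 'while i < len(words) and '-' in words[i]: combined_word += words[i]; i += 1'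
def pvInnerA (acc : String) : List String → String × List String
  | [] => (acc, [])
  | w :: rest =>
    if PySem.Str.isIn "-" w then pvInnerA (acc ++ w) rest else (acc, w :: rest)

theorem pvInnerA_len (acc : String) (l : List String) : (pvInnerA acc l).2.length ≤ l.length := by
  induction l generalizing acc with
  | nil => simp [pvInnerA]
  | cons w rest ih =>
    simp only [pvInnerA]
    split
    · exact Nat.le_succ_of_le (ih _)
    · exact Nat.le_refl _

-- outer while over the word list
def pvOuterA : List String → List String
  | [] => []
  | w :: rest =>
    if PySem.Str.isIn "-" w then
      (pvInnerA w rest).1 :: pvOuterA (pvInnerA w rest).2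
    else
      w :: pvOuterA rest
termination_by l => l.length
decreasing_by
  · exact Nat.lt_succ_of_le (pvInnerA_len _ _)
  · simp

def combine_hyphenated_words (line : String) : String :=
  PySem.Str.join " " (pvOuterA (PySem.Str.split₀ line))

-- ===== PORT B =====
-- one step of the fold: merge into the last output entry or append
def pvStepB (out : List String) (w : String) : List String :=
  match out.getLast? with
  | some last =>
    if PySem.Str.isIn "-" w && PySem.Str.isIn "-" last then
      out.dropLast ++ [last ++ w]
    else
      out ++ [w]
  | none => [w]

def combine_hyphenated_words_alt (line : String) : String :=
  PySem.Str.join " " ((PySem.Str.split₀ line).foldl pvStepB [])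

-- ===== PRECONDITION & SPEC =====
def Spec_combine_hyphenated_words (line : String) (out : String) : Prop := out = combine_hyphenated_words_alt line
instance (line : String) (out : String) : Decidable (Spec_combine_hyphenated_words line out) := by unfold Spec_combine_hyphenated_words; infer_instance

-- ===== CLAIM (what is proved, stated in full; the proofs are below) =====
def Claim_equal_combine_hyphenated_words : Prop := ∀ (line : String), Dom_combine_hyphenated_words line → Spec_combine_hyphenated_words line (combine_hyphenated_words line)

-- ===== LEMMAS AND PROOFS =====

theorem pv_isIn_append_left {a b : String} (h : PySem.Str.isIn "-" a = true) :
    PySem.Str.isIn "-" (a ++ b) = true := by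
  rw [PySem.Str.isIn_iff_infix] at h ⊢
  rw [String.toList_append]
  exact h.trans (List.prefix_append _ _).isInfix

theorem pvStepB_last_some (pre : List String) (last w : String)
    (h : pre.getLast? = some last) :
    pvStepB pre w =
      if PySem.Str.isIn "-" w && PySem.Str.isIn "-" last then
        pre.dropLast ++ [last ++ w]
      else pre ++ [w] := by
  simp [pvStepB, h]

-- combined invariant for the fold:
-- (A) with a pending hyphenated run 'acc' as last output entry, the fold continues the run;
-- (B) with no pending run (empty output or non-hyphenated last entry), the fold appends pvOuterA.
theorem pv_fold_inv (l : List String) :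
    (∀ (pre : List String) (acc : String), PySem.Str.isIn "-" acc = true →
        l.foldl pvStepB (pre ++ [acc]) = pre ++ ((pvInnerA acc l).1 :: pvOuterA (pvInnerA acc l).2)) ∧
    (∀ (pre : List String), (∀ last, pre.getLast? = some last → PySem.Str.isIn "-" last = false) →
        l.foldl pvStepB pre = pre ++ pvOuterA l) := by
  induction l with
  | nil =>
    constructor
    · intro pre acc _; simp [pvInnerA, pvOuterA]
    · intro pre _; simp [pvOuterA]
  | cons w rest ih =>
    obtain ⟨ihA, ihB⟩ := ih
    constructor
    · intro pre acc hacc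
      by_cases hw : PySem.Str.isIn "-" w = true
      · have hstep : pvStepB (pre ++ [acc]) w = pre ++ [acc ++ w] := by
          rw [pvStepB_last_some (pre ++ [acc]) acc w (by simp), hw, hacc]
          simp
        have hrec := ihA pre (acc ++ w) (pv_isIn_append_left hacc)
        have hwc : PySem.Chars.isIn ['-'] w.toList = true := by simpa using hw
        rw [List.foldl_cons, hstep, hrec]
        simp [pvInnerA, hwc]
      · have hw' : PySem.Str.isIn "-" w = false := eq_false_of_ne_true hw
        have hstep : pvStepB (pre ++ [acc]) w = pre ++ [acc, w] := by
          rw [pvStepB_last_some (pre ++ [acc]) acc w (by simp), hw']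
          simp
        have hB := ihB (pre ++ [acc, w]) (by
          intro last hl
          simp only [List.getLast?_append, List.getLast?_cons_cons, List.getLast?_singleton] at hl
          rw [← Option.some.inj hl]; exact hw')
        have hwc : PySem.Chars.isIn ['-'] w.toList = false := by simpa using hw'
        rw [List.foldl_cons, hstep, hB]
        simp [pvInnerA, pvOuterA, hwc]
    · intro pre hpre
      have hstep : pvStepB pre w = pre ++ [w] := by
        cases h : pre.getLast? with
        | none =>
          have hnil : pre = [] := by
            cases pre with
            | nil => rfl
            | cons x xs => simp at h
          simp [hnil, pvStepB]
        | some last =>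
          rw [pvStepB_last_some pre last w h, hpre last h]
          simp
      by_cases hw : PySem.Str.isIn "-" w = true
      · have hrec := ihA pre w hw
        have hwc : PySem.Chars.isIn ['-'] w.toList = true := by simpa using hw
        rw [List.foldl_cons, hstep, hrec]
        simp [pvOuterA, hwc]
      · have hw' : PySem.Str.isIn "-" w = false := eq_false_of_ne_true hw
        have hB := ihB (pre ++ [w]) (by
          intro last hl
          simp only [List.getLast?_append, List.getLast?_singleton] at hl
          rw [← Option.some.inj hl]; exact hw')
        have hwc : PySem.Chars.isIn ['-'] w.toList = false := by simpa using hw'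
        rw [List.foldl_cons, hstep, hB]
        simp [pvOuterA, hwc]

theorem pv_fold_eq_outer (l : List String) : l.foldl pvStepB [] = pvOuterA l := by
  have h := (pv_fold_inv l).2 [] (by intro last h; simp at h)
  simpa using h

-- ===== VERDICT (by name: the statement is the Claim_ definition above) =====
theorem combine_hyphenated_words_spec : Claim_equal_combine_hyphenated_words := by
  intro line _
  unfold Spec_combine_hyphenated_words combine_hyphenated_words combine_hyphenated_words_alt
  rw [pv_fold_eq_outer]
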